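-- pv_equiv track=rewrite | github.com/stelliclife/Algorithm | Python/KMP/KMP.py | get_pattern_size
-- ===== SOURCE A (Python) =====
-- def get_pattern_size(keyword):
--     k, count = 1, 0
--     data = []
--     for i in range(1, len(keyword) + 1):
--         target = keyword[:i]
--         if len(target) < 2:
--             count = 0
--         else:
--             if target[:k] == target[-k:]:
--                 count += 1
--                 k += 1
--             else:
--                 k, count = 1, 0
--         data.append(count)
--     return max(data)
-- ===== SOURCE B (Python) =====
-- def get_pattern_size(keyword):
--     n = len(keyword)
--     best = 0
--     j = 1
--     while j < n:
--         z = 0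
--         while j + z < n and keyword[z] == keyword[j + z]:
--             z += 1
--         if z > best:
--             best = z
--         j += z + 1
--     return best
-- ===== Notes on version B (the rewrite author's own statement) =====
-- stated objective: faster
-- what changed: A rebuilds every prefix and compares two slices per prefix then takes max over a data list; B makes one greedy left-to-right chain of longest-common-prefix scans (Z-style), each restart position visited once, keeping a running maximum.
import Mathlib
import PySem

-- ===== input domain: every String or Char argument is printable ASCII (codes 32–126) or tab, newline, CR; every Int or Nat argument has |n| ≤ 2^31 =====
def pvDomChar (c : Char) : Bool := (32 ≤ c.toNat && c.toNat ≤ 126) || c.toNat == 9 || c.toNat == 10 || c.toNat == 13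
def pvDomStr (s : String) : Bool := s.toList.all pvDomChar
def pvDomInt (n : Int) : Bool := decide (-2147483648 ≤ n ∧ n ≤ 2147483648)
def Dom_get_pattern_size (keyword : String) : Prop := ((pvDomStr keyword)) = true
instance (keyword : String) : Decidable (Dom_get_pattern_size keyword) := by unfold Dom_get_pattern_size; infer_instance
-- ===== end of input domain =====

-- B replaces A's per-prefix slice comparisons (O(n^2)) by a single greedy chain of
-- longest-common-prefix scans (O(n)); return values agree on every nonempty string.

-- ===== PORT A =====
def aStep (l : List Char) (st : Int × Int × List Int) (i : Int) : Int × Int × List Int :=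
  let target := PySem.List.slice l none (some i)
  if PySem.List.len target < 2 then (st.1, 0, st.2.2 ++ [0])
  else if PySem.List.slice target none (some st.1) = PySem.List.slice target (some (-st.1)) none then
    (st.1 + 1, st.2.1 + 1, st.2.2 ++ [st.2.1 + 1])
  else (1, 0, st.2.2 ++ [0])

def get_pattern_size (keyword : String) : Int :=
  let l := keyword.toList
  let st := (PySem.List.pyRange 1 (PySem.List.len l + 1) 1).foldl (aStep l) (1, 0, ([] : List Int))
  (PySem.List.max? st.2.2 (fun x => x)).getD 0

-- ===== PORT B =====
-- inner while loop of Source B (z scan); fuel only bounds the loop, it never changes the result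
def lcpAt (l : List Char) (j z fuel : Nat) : Nat :=
  match fuel with
  | 0 => z
  | fuel + 1 =>
    if j + z < l.length ∧ l[z]? = l[j + z]? then lcpAt l j (z + 1) fuel else z

-- outer while loop of Source B; fuel only bounds the loop (j grows by ≥ 1 each pass)
def bLoop (l : List Char) (j best fuel : Nat) : Nat :=
  match fuel with
  | 0 => best
  | fuel + 1 =>
    if j < l.length then
      let z := lcpAt l j 0 (l.length - j)
      bLoop l (j + z + 1) (if best < z then z else best) fuel
    else best

def get_pattern_size_alt (keyword : String) : Int :=
  ((bLoop keyword.toList 1 0 keyword.toList.length : Nat) : Int)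

-- ===== PRECONDITION & SPEC =====
-- Pre_ excludes only the empty string, on which A's max(data) raises ValueError.
def Pre_get_pattern_size (keyword : String) : Prop := keyword ≠ ""
instance (keyword : String) : Decidable (Pre_get_pattern_size keyword) := by
  unfold Pre_get_pattern_size; infer_instance
def pvWitness_get_pattern_size : String := "abab"

def Spec_get_pattern_size (keyword : String) (out : Int) : Prop := out = get_pattern_size_alt keyword
instance (keyword : String) (out : Int) : Decidable (Spec_get_pattern_size keyword out) := by
  unfold Spec_get_pattern_size; infer_instance

-- ===== CLAIM (what is proved, stated in full; the proofs are below) =====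
def Claim_equal_get_pattern_size : Prop := ∀ (keyword : String), Dom_get_pattern_size keyword → Pre_get_pattern_size keyword → Spec_get_pattern_size keyword (get_pattern_size keyword)

-- ===== LEMMAS AND PROOFS =====

lemma lcpAt_spec (l : List Char) (j : Nat) : ∀ fuel z, j + z ≤ l.length → l.length - (j + z) ≤ fuel →
    (∀ t, z ≤ t → t < lcpAt l j z fuel → l[t]? = l[j + t]?) ∧
    z ≤ lcpAt l j z fuel ∧ j + lcpAt l j z fuel ≤ l.length ∧
    (j + lcpAt l j z fuel = l.length ∨ l[lcpAt l j z fuel]? ≠ l[j + lcpAt l j z fuel]?) := by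
  intro fuel
  induction fuel with
  | zero =>
    intro z h1 h2
    have hz : lcpAt l j z 0 = z := rfl
    rw [hz]
    exact ⟨fun t ht ht' => absurd ht' (by omega), le_refl _, h1, Or.inl (by omega)⟩
  | succ fuel ih =>
    intro z h1 h2
    by_cases hc : j + z < l.length ∧ l[z]? = l[j + z]?
    · have hrec := ih (z + 1) (by omega) (by omega)
      simp only [lcpAt, if_pos hc]
      refine ⟨?_, by omega, hrec.2.2.1, hrec.2.2.2⟩
      intro t hzt htr
      rcases Nat.eq_or_lt_of_le hzt with h | h
      · exact h ▸ hc.2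
      · exact hrec.1 t h htr
    · simp only [lcpAt, if_neg hc]
      refine ⟨by omega, le_refl _, h1, ?_⟩
      by_cases hl : j + z = l.length
      · exact Or.inl hl
      · exact Or.inr (fun he => hc ⟨by omega, he⟩)

lemma cond_iff (l : List Char) (j c : Nat) (hin : j + c + 1 ≤ l.length) (hj : 1 ≤ j) :
    (l.take (c + 1) = (l.take (j + c + 1)).drop (j + c + 1 - (c + 1)) ↔
      c < lcpAt l j 0 (l.length - j)) := by
  obtain ⟨hall, -, hle, hstop⟩ := lcpAt_spec l j (l.length - j) 0 (by omega) (by omega)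
  set r := lcpAt l j 0 (l.length - j) with hr
  have hd : j + c + 1 - (c + 1) = j := by omega
  rw [hd, List.drop_take]
  have hs : j + c + 1 - j = c + 1 := by omega
  rw [hs]
  constructor
  · intro he
    have hpt : ∀ t, t < c + 1 → l[t]? = l[j + t]? := by
      intro t ht
      have := congrArg (fun xs => xs[t]?) he
      simpa [List.getElem?_take_of_lt ht, List.getElem?_drop] using this
    by_contra hcr
    have hrc : r ≤ c := by omega
    rcases hstop with h | h
    · omega
    · exact h (hpt r (by omega))
  · intro hcr
    apply List.ext_getElem?
    intro t
    by_cases ht : t < c + 1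
    · rw [List.getElem?_take_of_lt ht, List.getElem?_take_of_lt ht, List.getElem?_drop]
      exact hall t (by omega) (by omega)
    · rw [List.getElem?_take_eq_none (by omega), List.getElem?_take_eq_none (by omega)]

-- proof-only simulation of A's loop carrying the running maximum instead of the data list
def aRun (l : List Char) (i c m : Nat) : Nat :=
  if _h : i ≤ l.length then
    if l.take (c + 1) = (l.take i).drop (i - (c + 1)) then
      aRun l (i + 1) (c + 1) (max m (c + 1))
    else
      aRun l (i + 1) 0 m
  else m
termination_by l.length + 1 - i

lemma run_eq (l : List Char) (j : Nat) (hj : 1 ≤ j) (hjn : j < l.length) :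
    ∀ k c m, lcpAt l j 0 (l.length - j) - c = k → c ≤ lcpAt l j 0 (l.length - j) →
      aRun l (j + 1 + c) c (max m c) =
        aRun l (j + lcpAt l j 0 (l.length - j) + 2) 0 (max m (lcpAt l j 0 (l.length - j))) := by
  obtain ⟨-, -, hle, -⟩ := lcpAt_spec l j (l.length - j) 0 (by omega) (by omega)
  set r := lcpAt l j 0 (l.length - j) with hr
  intro k
  induction k with
  | zero =>
    intro c m hn hc
    have hcr : c = r := by omega
    subst hcr
    by_cases hi : j + 1 + r ≤ l.length
    · rw [aRun, dif_pos hi]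
      have hcond : ¬ (l.take (r + 1) = (l.take (j + 1 + r)).drop (j + 1 + r - (r + 1))) := by
        have := (cond_iff l j r (by omega) hj)
        rw [show j + r + 1 = j + 1 + r by omega] at this
        rw [this]
        omega
      rw [if_neg hcond]
      congr 1
      omega
    · rw [aRun, dif_neg hi, aRun, dif_neg (by omega)]
  | succ k ih =>
    intro c m hn hc
    have hcr : c < r := by omega
    have hi : j + 1 + c ≤ l.length := by omega
    rw [aRun, dif_pos hi]
    have hcond : l.take (c + 1) = (l.take (j + 1 + c)).drop (j + 1 + c - (c + 1)) := by
      have := (cond_iff l j c (by omega) hj)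
      rw [show j + c + 1 = j + 1 + c by omega] at this
      rw [this]
      omega
    rw [if_pos hcond]
    have hmx : max (max m c) (c + 1) = max m (c + 1) := by omega
    rw [hmx, show j + 1 + c + 1 = j + 1 + (c + 1) by omega]
    exact ih (c + 1) m (by omega) (by omega)

lemma bLoop_eq (l : List Char) : ∀ fuel j m, 1 ≤ j → l.length - j ≤ fuel →
    bLoop l j m fuel = aRun l (j + 1) 0 m := by
  intro fuel
  induction fuel with
  | zero =>
    intro j m hj hf
    rw [bLoop, aRun, dif_neg (by omega)]
  | succ fuel ih =>
    intro j m hj hf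
    by_cases hjn : j < l.length
    · rw [bLoop]
      simp only [if_pos hjn]
      obtain ⟨-, -, hle, -⟩ := lcpAt_spec l j (l.length - j) 0 (by omega) (by omega)
      set z := lcpAt l j 0 (l.length - j) with hz
      rw [ih (j + z + 1) _ (by omega) (by omega)]
      have h0 := run_eq l j hj hjn z 0 m (by omega) (by omega)
      rw [show j + 1 + 0 = j + 1 by omega, Nat.max_zero] at h0
      rw [h0]
      congr 1
      have : (if m < z then z else m) = max m z := by split_ifs <;> omega
      rw [this]
    · rw [bLoop]
      simp only [if_neg hjn]
      rw [aRun, dif_neg (by omega)]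

lemma max?_append_singleton (data : List Int) (m x : Int)
    (h : PySem.List.max? data (fun y => y) = some m) :
    PySem.List.max? (data ++ [x]) (fun y => y) = some (max m x) := by
  cases data with
  | nil => simp [PySem.List.max?] at h
  | cons d ds =>
    rw [PySem.List.max?_id_cons] at h
    have hm : ds.foldl max d = m := by injection h
    rw [List.cons_append, PySem.List.max?_id_cons, List.foldl_append, hm]
    simp

lemma aStep_eval (l : List Char) (i c : Nat) (data : List Int)
    (h2 : 2 ≤ i) (hi : i ≤ l.length) (hc : c + 1 < i) :
    aStep l ((c : Int) + 1, (c : Int), data) (i : Int) =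
      if l.take (c + 1) = (l.take i).drop (i - (c + 1)) then
        ((c : Int) + 1 + 1, (c : Int) + 1, data ++ [(c : Int) + 1])
      else (1, 0, data ++ [0]) := by
  unfold aStep
  rw [PySem.List.slice_to_natCast]
  have hlen : (l.take i).length = i := by simp; omega
  have hlt : ¬ (PySem.List.len (l.take i) < 2) := by
    rw [PySem.List.len_eq, hlen]; omega
  rw [if_neg hlt]
  have e1 : ((c : Int) + 1) = ((c + 1 : Nat) : Int) := by push_cast; ring
  rw [show (PySem.List.slice (l.take i) none (some ((c:Int)+1))) = (l.take i).take (c+1) by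
        rw [e1, PySem.List.slice_to_natCast],
      show (PySem.List.slice (l.take i) (some (-((c:Int)+1))) none) = (l.take i).drop ((l.take i).length - (c+1)) by
        rw [e1, PySem.List.slice_from_neg_natCast (l.take i) (c+1) (by omega)],
      List.take_take, hlen]
  have : min (c + 1) i = c + 1 := by omega
  rw [this]

lemma A_fold (l : List Char) : ∀ nsteps i c (data : List Int) (m : Nat),
    l.length + 1 - i = nsteps → 2 ≤ i → c + 1 < i →
    PySem.List.max? data (fun y => y) = some ((m : Nat) : Int) →
    (PySem.List.max? (((PySem.List.pyRange (i : Int) ((l.length : Int) + 1) 1).foldl (aStep l)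
        ((c : Int) + 1, (c : Int), data)).2.2) (fun y => y)).getD 0 = ((aRun l i c m : Nat) : Int) := by
  intro nsteps
  induction nsteps with
  | zero =>
    intro i c data m hn h2 hc hm
    have hgt : l.length < i := by omega
    rw [PySem.List.pyRange_one_eq_nil (by exact_mod_cast by omega : (l.length : Int) + 1 ≤ (i : Int))]
    rw [aRun, dif_neg (by omega)]
    simp [hm]
  | succ ns ih =>
    intro i c data m hn h2 hc hm
    have hile : i ≤ l.length := by omega
    rw [PySem.List.pyRange_one_cons (by exact_mod_cast by omega : (i : Int) < (l.length : Int) + 1)]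
    rw [List.foldl_cons, aStep_eval l i c data h2 hile hc]
    rw [aRun, dif_pos hile]
    by_cases hcond : l.take (c + 1) = (l.take i).drop (i - (c + 1))
    · rw [if_pos hcond, if_pos hcond]
      have e1 : ((c : Int) + 1 + 1) = ((c + 1 : Nat) : Int) + 1 := by push_cast; ring
      have e2 : ((c : Int) + 1) = ((c + 1 : Nat) : Int) := by push_cast; ring
      have hm' : PySem.List.max? (data ++ [(c : Int) + 1]) (fun y => y)
          = some ((max m (c + 1) : Nat) : Int) := by
        rw [max?_append_singleton data _ _ hm]
        congr 1
        push_cast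
        omega
      rw [e1, e2, show ((i : Int) + 1) = ((i + 1 : Nat) : Int) by push_cast; ring]
      exact ih (i + 1) (c + 1) _ (max m (c + 1)) (by omega) (by omega) (by omega) hm'
    · rw [if_neg hcond, if_neg hcond]
      have hm' : PySem.List.max? (data ++ [(0 : Int)]) (fun y => y) = some ((m : Nat) : Int) := by
        rw [max?_append_singleton data _ _ hm]
        congr 1
        omega
      have e1 : (1 : Int) = ((0 : Nat) : Int) + 1 := by norm_num
      have e2 : (0 : Int) = ((0 : Nat) : Int) := by norm_num
      rw [show ((i : Int) + 1) = ((i + 1 : Nat) : Int) by push_cast; ring]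
      calc (PySem.List.max? (((PySem.List.pyRange ((i + 1 : Nat) : Int) ((l.length : Int) + 1) 1).foldl (aStep l)
            (1, 0, data ++ [0])).2.2) (fun y => y)).getD 0
          = (PySem.List.max? (((PySem.List.pyRange ((i + 1 : Nat) : Int) ((l.length : Int) + 1) 1).foldl (aStep l)
            (((0 : Nat) : Int) + 1, ((0 : Nat) : Int), data ++ [0])).2.2) (fun y => y)).getD 0 := by norm_num
        _ = ((aRun l (i + 1) 0 m : Nat) : Int) :=
            ih (i + 1) 0 _ m (by omega) (by omega) (by omega) hm'

lemma ports_agree (keyword : String) (h : keyword ≠ "") :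
    get_pattern_size keyword = get_pattern_size_alt keyword := by
  unfold get_pattern_size get_pattern_size_alt
  set l := keyword.toList with hl
  have hn : 1 ≤ l.length := by
    rcases Nat.eq_zero_or_pos l.length with h0 | h0
    · exact absurd (String.toList_eq_nil_iff.mp (hl ▸ List.eq_nil_of_length_eq_zero h0)) h
    · omega
  show (PySem.List.max? (((PySem.List.pyRange 1 (PySem.List.len l + 1) 1).foldl (aStep l)
      (1, 0, ([] : List Int))).2.2) (fun x => x)).getD 0 = ((bLoop l 1 0 l.length : Nat) : Int)
  rw [PySem.List.len_eq]
  rw [PySem.List.pyRange_one_cons (by omega : (1 : Int) < (l.length : Int) + 1)]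
  rw [List.foldl_cons]
  have hstep : aStep l (1, 0, ([] : List Int)) 1 = (1, 0, [0]) := by
    unfold aStep
    rw [PySem.List.slice_to l (by norm_num : (0:Int) ≤ 1)]
    have hlt : PySem.List.len (l.take (1:Int).toNat) < 2 := by
      rw [PySem.List.len_eq]
      have : (l.take (1:Int).toNat).length ≤ 1 := by
        simp [Int.toNat_one]
      omega
    rw [if_pos hlt]
    rfl
  rw [hstep]
  norm_num
  have hm0 : PySem.List.max? ([(0:Int)]) (fun y => y) = some (((0:Nat) : Nat) : Int) := by
    rw [PySem.List.max?_id_cons]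
    simp
  have hA := A_fold l (l.length + 1 - 2) 2 0 [0] 0 rfl (by omega) (by omega) hm0
  norm_num at hA
  rw [hA]
  rw [bLoop_eq l l.length 1 0 (le_refl 1) (by omega)]

-- ===== VERDICT (by name: the statement is the Claim_ definition above) =====
theorem get_pattern_size_spec : Claim_equal_get_pattern_size := by
  intro keyword _ hpre
  unfold Spec_get_pattern_size
  exact ports_agree keyword hpre
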